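-- pv_equiv track=rewrite | github.com/U-chom2/MoZuku | mozuku-lsp-py/mozuku_lsp/comment_extractor.py | _sanitize_latex_comment
-- ===== SOURCE A (Python) =====
-- def _sanitize_latex_comment(text: str) -> str:
--     """Sanitize LaTeX comment text."""
--     if not text:
--         return text
--
--     result = list(text)
--     result[0] = " "  # Replace %
--
--     # Replace consecutive % at start
--     idx = 1
--     while idx < len(result) and result[idx] == "%":
--         result[idx] = " "
--         idx += 1
--
--     # Replace leading whitespace
--     while idx < len(result) and result[idx] in " \t":
--         result[idx] = " "
--         idx += 1
--
--     return "".join(result)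
-- ===== SOURCE B (Python) =====
-- def _sanitize_latex_comment(text: str) -> str:
--     """Sanitize LaTeX comment text."""
--     if not text:
--         return text
--     rest = text[1:]
--     after_percent = rest.lstrip('%')
--     after_ws = after_percent.lstrip(' \t')
--     n = 1 + (len(rest) - len(after_percent)) + (len(after_percent) - len(after_ws))
--     return ' ' * n + after_ws
-- ===== Notes on version B (the rewrite author's own statement) =====
-- stated objective: simpler
-- what changed: Replaces A's mutable char-array with two index-advancing while loops by peeling text[1:], using lstrip('%') and lstrip(' \t') to find the boundaries, and prepending the computed number of spaces.
import Mathlib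
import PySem

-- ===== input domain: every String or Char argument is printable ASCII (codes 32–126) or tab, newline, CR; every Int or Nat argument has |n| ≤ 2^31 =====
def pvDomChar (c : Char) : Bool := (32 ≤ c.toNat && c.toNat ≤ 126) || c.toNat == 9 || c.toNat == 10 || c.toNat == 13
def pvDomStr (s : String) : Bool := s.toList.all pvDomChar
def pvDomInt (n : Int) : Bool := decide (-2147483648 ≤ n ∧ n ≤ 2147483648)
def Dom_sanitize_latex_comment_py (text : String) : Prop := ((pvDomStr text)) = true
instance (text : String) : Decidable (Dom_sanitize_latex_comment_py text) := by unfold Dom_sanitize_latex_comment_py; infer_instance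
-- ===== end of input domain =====

-- B replaces A's mutable char array with two index-advancing while loops by lstrip-based
-- boundary finding plus a space-prefix of the computed length (objective: simpler).

-- ===== PORT A =====
-- second while loop: replace leading space/tab by ' ', keep the rest
def pvALoop2 : List Char → List Char
  | [] => []
  | c :: rest => if c == ' ' || c == '\t' then ' ' :: pvALoop2 rest else c :: rest

-- first while loop: replace leading '%' by ' ', then fall through to the second loop
def pvALoop1 : List Char → List Char
  | [] => pvALoop2 []
  | c :: rest => if c == '%' then ' ' :: pvALoop1 rest else pvALoop2 (c :: rest)

def sanitize_latex_comment_py (text : String) : String :=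
  match text.toList with
  | [] => text                                   -- if not text: return text
  | _ :: rest => String.mk (' ' :: pvALoop1 rest) -- result[0] = " "; then the two while loops

-- ===== PORT B =====
def sanitize_latex_comment_py_alt (text : String) : String :=
  match text.toList with
  | [] => text
  | _ :: _ =>
    let rest := PySem.List.slice text.toList (some 1) none          -- text[1:]
    let afterPercent := rest.dropWhile (· == '%')                   -- rest.lstrip('%'), exact
    let afterWs := afterPercent.dropWhile (fun c => c == ' ' || c == '\t')  -- .lstrip(' \t'), exact
    let n := 1 + (rest.length - afterPercent.length) + (afterPercent.length - afterWs.length)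
    String.mk (List.replicate n ' ' ++ afterWs)                     -- ' ' * n + after_ws

-- ===== PRECONDITION & SPEC =====
def Spec_sanitize_latex_comment_py (text : String) (out : String) : Prop := out = sanitize_latex_comment_py_alt text
instance (text : String) (out : String) : Decidable (Spec_sanitize_latex_comment_py text out) := by unfold Spec_sanitize_latex_comment_py; infer_instance

-- ===== CLAIM (what is proved, stated in full; the proofs are below) =====
def Claim_equal_sanitize_latex_comment_py : Prop := ∀ (text : String), Dom_sanitize_latex_comment_py text → Spec_sanitize_latex_comment_py text (sanitize_latex_comment_py text)

-- ===== LEMMAS AND PROOFS =====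
theorem pvALoop2_eq (l : List Char) :
    pvALoop2 l = List.replicate (l.length - (l.dropWhile (fun c => c == ' ' || c == '\t')).length) ' '
      ++ l.dropWhile (fun c => c == ' ' || c == '\t') := by
  induction l with
  | nil => simp [pvALoop2]
  | cons c rest ih =>
    by_cases h : (c == ' ' || c == '\t') = true
    · have hlen : (rest.dropWhile (fun c => c == ' ' || c == '\t')).length ≤ rest.length :=
        List.length_dropWhile_le _ _
      simp [pvALoop2, List.dropWhile, h, ih]
      rw [Nat.succ_sub hlen]
      simp [List.replicate_succ]
    · simp [pvALoop2, List.dropWhile, h]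

theorem pvALoop1_eq (l : List Char) :
    pvALoop1 l = List.replicate (l.length - (l.dropWhile (· == '%')).length) ' '
      ++ pvALoop2 (l.dropWhile (· == '%')) := by
  induction l with
  | nil => simp [pvALoop1]
  | cons c rest ih =>
    by_cases h : (c == '%') = true
    · have hlen : (rest.dropWhile (· == '%')).length ≤ rest.length :=
        List.length_dropWhile_le _ _
      simp [pvALoop1, List.dropWhile, h, ih]
      rw [Nat.succ_sub hlen]
      simp [List.replicate_succ]
    · simp [pvALoop1, List.dropWhile, h]

-- ===== VERDICT (by name: the statement is the Claim_ definition above) =====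
theorem sanitize_latex_comment_py_spec : Claim_equal_sanitize_latex_comment_py := by
  intro text _
  unfold Spec_sanitize_latex_comment_py sanitize_latex_comment_py sanitize_latex_comment_py_alt
  cases htl : text.toList with
  | nil => rfl
  | cons c rest =>
    simp only [PySem.List.slice_from_one, List.tail_cons]
    rw [pvALoop1_eq, pvALoop2_eq]
    have h1 : (rest.dropWhile (· == '%')).length ≤ rest.length := List.length_dropWhile_le _ _
    have h2 : ((rest.dropWhile (· == '%')).dropWhile (fun c => c == ' ' || c == '\t')).length
        ≤ (rest.dropWhile (· == '%')).length := List.length_dropWhile_le _ _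
    congr 1
    rw [show (1 + (rest.length - (rest.dropWhile (· == '%')).length)
        + ((rest.dropWhile (· == '%')).length
          - ((rest.dropWhile (· == '%')).dropWhile (fun c => c == ' ' || c == '\t')).length))
      = Nat.succ ((rest.length - (rest.dropWhile (· == '%')).length)
        + ((rest.dropWhile (· == '%')).length
          - ((rest.dropWhile (· == '%')).dropWhile (fun c => c == ' ' || c == '\t')).length)) by omega]
    simp only [List.replicate_succ, List.replicate_add, List.cons_append, List.append_assoc]
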